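-- pv_equiv track=rewrite | github.com/Sudarshan-Rao/GameRecommender | api/utils/get_recommendation.py | rank_games_based_on_max_matches
-- ===== SOURCE A (Python) =====
-- import itertools
--
-- def rank_games_based_on_max_matches(all_ids, game_list):
--     rank_map = {}
--     for game_id in all_ids:
--         rank_map[game_id] = 1
--
--     for game_id in all_ids:
--         for tags in game_list:
--             if game_id in tags:
--                 rank_map[game_id] = rank_map[game_id] + 1
--     rank_map = dict(sorted(rank_map.items(), key=lambda item: item[1]))
--     rank_map = dict(reversed(list(rank_map.items())))
--     top_fifty = dict(itertools.islice(rank_map.items(), 50))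
--     return list(top_fifty.keys())
-- ===== SOURCE B (Python) =====
-- def rank_games_based_on_max_matches(all_ids, game_list):
--     id_set = set(all_ids)
--     matches = {}
--     for tags in game_list:
--         for g in set(tags):
--             if g in id_set:
--                 matches[g] = matches.get(g, 0) + 1
--     score = {}
--     for g in all_ids:
--         score[g] = score.get(g, 0) + matches.get(g, 0)
--     return sorted(score, key=score.get)[::-1][:50]
-- ===== Notes on version B (the rewrite author's own statement) =====
-- stated objective: faster
-- what changed: B replaces A's per-id rescan of every tag list (and the dict sort/reverse/islice pipeline) by one pass over the tag lists incrementing a match-count dict for ids in set(all_ids), one accumulation pass over all_ids, and a single ascending sort of the ids reversed and truncated to 50.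
import Mathlib
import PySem

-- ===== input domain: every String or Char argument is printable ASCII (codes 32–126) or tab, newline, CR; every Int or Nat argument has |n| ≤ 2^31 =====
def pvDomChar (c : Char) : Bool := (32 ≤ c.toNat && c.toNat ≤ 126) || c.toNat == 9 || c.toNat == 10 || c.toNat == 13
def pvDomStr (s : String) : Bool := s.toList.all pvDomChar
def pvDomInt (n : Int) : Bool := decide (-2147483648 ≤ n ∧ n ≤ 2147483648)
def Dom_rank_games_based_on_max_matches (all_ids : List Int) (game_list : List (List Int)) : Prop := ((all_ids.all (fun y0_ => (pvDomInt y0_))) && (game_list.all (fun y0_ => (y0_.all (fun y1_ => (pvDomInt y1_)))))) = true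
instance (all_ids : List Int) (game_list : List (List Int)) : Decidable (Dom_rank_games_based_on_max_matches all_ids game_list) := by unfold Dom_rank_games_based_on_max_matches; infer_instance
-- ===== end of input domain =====

-- B replaces A's per-id rescan of every tag list by one pass over the tag lists with a
-- match-count dictionary and one accumulation pass, then one sort of the ids (objective: faster, asymptotic).

-- ===== PORT A =====
def rank_games_based_on_max_matches (all_ids : List Int) (game_list : List (List Int)) : List Int :=
  let rank_map : PySem.Dict Int Int :=
    all_ids.foldl (fun d game_id => d.insert game_id 1) PySem.Dict.empty
  -- rank_map[game_id] read: the key is always present here (first loop inserted it), so getD is exact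
  let rank_map :=
    all_ids.foldl (fun d game_id =>
      game_list.foldl (fun d tags =>
        if game_id ∈ tags then d.insert game_id (d.getD game_id 0 + 1) else d) d) rank_map
  let rank_map := PySem.Dict.ofList (PySem.List.sorted rank_map.items (fun item => item.2) false)
  let rank_map := PySem.Dict.ofList rank_map.items.reverse
  let top_fifty := PySem.Dict.ofList (PySem.List.slice rank_map.items none (some 50))
  top_fifty.keys

-- ===== PORT B =====
def rank_games_based_on_max_matches_alt (all_ids : List Int) (game_list : List (List Int)) : List Int :=
  let id_set : PySem.Set Int := PySem.Set.ofList all_ids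
  let mcounts : PySem.Dict Int Int :=
    game_list.foldl (fun d tags =>
      (PySem.List.dedup tags).foldl (fun d g =>
        if PySem.Set.contains id_set g then d.insert g (d.getD g 0 + 1) else d) d)
      PySem.Dict.empty
  let score : PySem.Dict Int Int :=
    all_ids.foldl (fun d g => d.insert g (d.getD g 0 + mcounts.getD g 0)) PySem.Dict.empty
  -- score.get g: every g iterated over is a key of score, so getD is exact
  let order := PySem.List.sorted score.keys (fun g => score.getD g 0) false
  PySem.List.slice order.reverse none (some 50)   -- [::-1] is reverse; then [:50]

-- ===== PRECONDITION & SPEC =====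
def Spec_rank_games_based_on_max_matches (all_ids : List Int) (game_list : List (List Int)) (out : List Int) : Prop := out = rank_games_based_on_max_matches_alt all_ids game_list
instance (all_ids : List Int) (game_list : List (List Int)) (out : List Int) : Decidable (Spec_rank_games_based_on_max_matches all_ids game_list out) := by unfold Spec_rank_games_based_on_max_matches; infer_instance

-- ===== CLAIM (what is proved, stated in full; the proofs are below) =====
def Claim_equal_rank_games_based_on_max_matches : Prop := ∀ (all_ids : List Int) (game_list : List (List Int)), Dom_rank_games_based_on_max_matches all_ids game_list → Spec_rank_games_based_on_max_matches all_ids game_list (rank_games_based_on_max_matches all_ids game_list)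

-- ===== LEMMAS AND PROOFS =====

-- ---- generic stable-sort facts (Int keys) ----

-- insertBy for ascending insertion on an ascending-sorted list, as filters
theorem pvInsA_char {α : Type} (key : α → Int) (x : α) (l : List α)
    (h : l.Pairwise (fun a b => key a ≤ key b)) :
    PySem.List.insertBy (fun a b => decide (key a < key b)) x l
      = l.filter (fun y => decide (key y ≤ key x)) ++ x :: l.filter (fun y => decide (key x < key y)) := by
  induction l with
  | nil => simp [PySem.List.insertBy]
  | cons y t ih =>
    rcases List.pairwise_cons.mp h with ⟨hy, ht⟩
    by_cases hxy : key x < key y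
    · have h1 : (y :: t).filter (fun z => decide (key z ≤ key x)) = [] := by
        rw [List.filter_eq_nil_iff]; intro z hz
        rcases List.mem_cons.mp hz with rfl | hz
        · simp; omega
        · have := hy z hz; simp; omega
      have h2 : (y :: t).filter (fun z => decide (key x < key z)) = y :: t := by
        rw [List.filter_eq_self]; intro z hz
        rcases List.mem_cons.mp hz with rfl | hz
        · simp; omega
        · have := hy z hz; simp; omega
      rw [h1, h2]; simp [PySem.List.insertBy, hxy]
    · have hyx : key y ≤ key x := by omega
      simp only [PySem.List.insertBy, hxy]
      simp only [List.filter_cons, decide_eq_true_eq, if_pos hyx, if_neg hxy]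
      simp [ih ht]

-- insertBy with "key y ≤ key x" test on a descending-sorted list (x goes before equal keys)
theorem pvInsL_char {α : Type} (key : α → Int) (x : α) (l : List α)
    (h : l.Pairwise (fun a b => key b ≤ key a)) :
    PySem.List.insertBy (fun a b => decide (key b ≤ key a)) x l
      = l.filter (fun y => decide (key x < key y)) ++ x :: l.filter (fun y => decide (key y ≤ key x)) := by
  induction l with
  | nil => simp [PySem.List.insertBy]
  | cons y t ih =>
    rcases List.pairwise_cons.mp h with ⟨hy, ht⟩
    by_cases hxy : key y ≤ key x
    · have h1 : (y :: t).filter (fun z => decide (key x < key z)) = [] := by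
        rw [List.filter_eq_nil_iff]; intro z hz
        rcases List.mem_cons.mp hz with rfl | hz
        · simp; omega
        · have := hy z hz; simp; omega
      have h2 : (y :: t).filter (fun z => decide (key z ≤ key x)) = y :: t := by
        rw [List.filter_eq_self]; intro z hz
        rcases List.mem_cons.mp hz with rfl | hz
        · simp; omega
        · have := hy z hz; simp; omega
      rw [h1, h2]; simp [PySem.List.insertBy, hxy]
    · have hyx : key x < key y := by omega
      simp only [PySem.List.insertBy, hxy]
      simp only [List.filter_cons, decide_eq_true_eq, if_pos hyx, if_neg hxy]
      simp [ih ht]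

-- insertBy with "key y < key x" test on a descending-sorted list (x goes after equal keys)
theorem pvInsG_char {α : Type} (key : α → Int) (x : α) (l : List α)
    (h : l.Pairwise (fun a b => key b ≤ key a)) :
    PySem.List.insertBy (fun a b => decide (key b < key a)) x l
      = l.filter (fun y => decide (key x ≤ key y)) ++ x :: l.filter (fun y => decide (key y < key x)) := by
  induction l with
  | nil => simp [PySem.List.insertBy]
  | cons y t ih =>
    rcases List.pairwise_cons.mp h with ⟨hy, ht⟩
    by_cases hxy : key y < key x
    · have h1 : (y :: t).filter (fun z => decide (key x ≤ key z)) = [] := by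
        rw [List.filter_eq_nil_iff]; intro z hz
        rcases List.mem_cons.mp hz with rfl | hz
        · simp; omega
        · have := hy z hz; simp; omega
      have h2 : (y :: t).filter (fun z => decide (key z < key x)) = y :: t := by
        rw [List.filter_eq_self]; intro z hz
        rcases List.mem_cons.mp hz with rfl | hz
        · simp; omega
        · have := hy z hz; simp; omega
      rw [h1, h2]; simp [PySem.List.insertBy, hxy]
    · have hyx : key x ≤ key y := by omega
      simp only [PySem.List.insertBy, hxy]
      simp only [List.filter_cons, decide_eq_true_eq, if_pos hyx, if_neg hxy]
      simp [ih ht]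

theorem pvInsA_pairwise {α : Type} (key : α → Int) (x : α) (l : List α)
    (h : l.Pairwise (fun a b => key a ≤ key b)) :
    (PySem.List.insertBy (fun a b => decide (key a < key b)) x l).Pairwise (fun a b => key a ≤ key b) := by
  rw [pvInsA_char key x l h]
  rw [List.pairwise_append]
  refine ⟨List.Pairwise.sublist List.filter_sublist h, List.pairwise_cons.mpr ⟨?_, List.Pairwise.sublist List.filter_sublist h⟩, ?_⟩
  · intro z hz
    have := (List.mem_filter.mp hz).2; simp at this; omega
  · intro a ha b hb
    have ha' := (List.mem_filter.mp ha).2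
    rcases List.mem_cons.mp hb with rfl | hb
    · simp at ha'; omega
    · have hb' := (List.mem_filter.mp hb).2; simp at ha' hb'; omega

theorem pvInsL_pairwise {α : Type} (key : α → Int) (x : α) (l : List α)
    (h : l.Pairwise (fun a b => key b ≤ key a)) :
    (PySem.List.insertBy (fun a b => decide (key b ≤ key a)) x l).Pairwise (fun a b => key b ≤ key a) := by
  rw [pvInsL_char key x l h]
  rw [List.pairwise_append]
  refine ⟨List.Pairwise.sublist List.filter_sublist h, List.pairwise_cons.mpr ⟨?_, List.Pairwise.sublist List.filter_sublist h⟩, ?_⟩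
  · intro z hz
    have := (List.mem_filter.mp hz).2; simp at this; omega
  · intro a ha b hb
    have ha' := (List.mem_filter.mp ha).2
    rcases List.mem_cons.mp hb with rfl | hb
    · simp at ha'; omega
    · have hb' := (List.mem_filter.mp hb).2; simp at ha' hb'; omega

theorem pvInsG_pairwise {α : Type} (key : α → Int) (x : α) (l : List α)
    (h : l.Pairwise (fun a b => key b ≤ key a)) :
    (PySem.List.insertBy (fun a b => decide (key b < key a)) x l).Pairwise (fun a b => key b ≤ key a) := by
  rw [pvInsG_char key x l h]
  rw [List.pairwise_append]
  refine ⟨List.Pairwise.sublist List.filter_sublist h, List.pairwise_cons.mpr ⟨?_, List.Pairwise.sublist List.filter_sublist h⟩, ?_⟩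
  · intro z hz
    have := (List.mem_filter.mp hz).2; simp at this; omega
  · intro a ha b hb
    have ha' := (List.mem_filter.mp ha).2
    rcases List.mem_cons.mp hb with rfl | hb
    · simp at ha'; omega
    · have hb' := (List.mem_filter.mp hb).2; simp at ha' hb'; omega

-- the two descending insertions commute on a descending-sorted list
theorem pvIns_comm {α : Type} (key : α → Int) (a b : α) (l : List α)
    (h : l.Pairwise (fun a b => key b ≤ key a)) :
    PySem.List.insertBy (fun a b => decide (key b ≤ key a)) b
        (PySem.List.insertBy (fun a b => decide (key b < key a)) a l)
      = PySem.List.insertBy (fun a b => decide (key b < key a)) a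
        (PySem.List.insertBy (fun a b => decide (key b ≤ key a)) b l) := by
  have h1 := pvInsG_pairwise key a l h
  have h2 := pvInsL_pairwise key b l h
  rw [pvInsL_char key b _ h1, pvInsG_char key a _ h2, pvInsG_char key a l h, pvInsL_char key b l h]
  simp only [List.filter_append, List.filter_cons, List.filter_filter, ← Bool.decide_and]
  rcases lt_trichotomy (key a) (key b) with hc | hc | hc
  · rw [if_neg (by simp; omega), if_pos (by simp; omega), if_pos (by simp; omega), if_neg (by simp; omega)]
    rw [show (l.filter fun y => decide (key a ≤ key y ∧ key b < key y)) = l.filter fun y => decide (key b < key y) from List.filter_congr (fun y _ => decide_eq_decide.mpr (by omega))]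
    rw [show (l.filter fun y => decide (key y < key a ∧ key b < key y)) = [] from List.filter_eq_nil_iff.mpr (by intro y _; simp; omega)]
    rw [show (l.filter fun y => decide (key y < key a ∧ key y ≤ key b)) = l.filter fun y => decide (key y < key a) from List.filter_congr (fun y _ => decide_eq_decide.mpr (by omega))]
    rw [show (l.filter fun y => decide (key b < key y ∧ key a ≤ key y)) = l.filter fun y => decide (key b < key y) from List.filter_congr (fun y _ => decide_eq_decide.mpr (by omega))]
    rw [show (l.filter fun y => decide (key y ≤ key b ∧ key y < key a)) = l.filter fun y => decide (key y < key a) from List.filter_congr (fun y _ => decide_eq_decide.mpr (by omega))]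
    rw [show (l.filter fun y => decide (key a ≤ key y ∧ key y ≤ key b)) = l.filter fun y => decide (key y ≤ key b ∧ key a ≤ key y) from List.filter_congr (fun y _ => decide_eq_decide.mpr (by omega))]
    simp
    intro y _ _; omega
  · rw [if_neg (by simp; omega), if_pos (by simp; omega), if_pos (by simp; omega), if_neg (by simp; omega)]
    rw [show (l.filter fun y => decide (key a ≤ key y ∧ key b < key y)) = l.filter fun y => decide (key b < key y) from List.filter_congr (fun y _ => decide_eq_decide.mpr (by omega))]
    rw [show (l.filter fun y => decide (key y < key a ∧ key b < key y)) = [] from List.filter_eq_nil_iff.mpr (by intro y _; simp; omega)]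
    rw [show (l.filter fun y => decide (key y < key a ∧ key y ≤ key b)) = l.filter fun y => decide (key y < key a) from List.filter_congr (fun y _ => decide_eq_decide.mpr (by omega))]
    rw [show (l.filter fun y => decide (key b < key y ∧ key a ≤ key y)) = l.filter fun y => decide (key b < key y) from List.filter_congr (fun y _ => decide_eq_decide.mpr (by omega))]
    rw [show (l.filter fun y => decide (key y ≤ key b ∧ key y < key a)) = l.filter fun y => decide (key y < key a) from List.filter_congr (fun y _ => decide_eq_decide.mpr (by omega))]
    rw [show (l.filter fun y => decide (key a ≤ key y ∧ key y ≤ key b)) = l.filter fun y => decide (key y ≤ key b ∧ key a ≤ key y) from List.filter_congr (fun y _ => decide_eq_decide.mpr (by omega))]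
    simp
    intro y _ _; omega
  · rw [if_pos (by simp; omega), if_neg (by simp; omega), if_neg (by simp; omega), if_pos (by simp; omega)]
    rw [show (l.filter fun y => decide (key a ≤ key y ∧ key b < key y)) = l.filter fun y => decide (key a ≤ key y) from List.filter_congr (fun y _ => decide_eq_decide.mpr (by omega))]
    rw [show (l.filter fun y => decide (key y < key a ∧ key b < key y)) = l.filter fun y => decide (key b < key y ∧ key y < key a) from List.filter_congr (fun y _ => decide_eq_decide.mpr (by omega))]
    rw [show (l.filter fun y => decide (key y < key a ∧ key y ≤ key b)) = l.filter fun y => decide (key y ≤ key b) from List.filter_congr (fun y _ => decide_eq_decide.mpr (by omega))]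
    rw [show (l.filter fun y => decide (key b < key y ∧ key a ≤ key y)) = l.filter fun y => decide (key a ≤ key y) from List.filter_congr (fun y _ => decide_eq_decide.mpr (by omega))]
    rw [show (l.filter fun y => decide (key b < key y ∧ key y < key a)) = l.filter fun y => decide (key b < key y ∧ key y < key a) from rfl]
    rw [show (l.filter fun y => decide (key y ≤ key b ∧ key a ≤ key y)) = [] from List.filter_eq_nil_iff.mpr (by intro y _; simp; omega)]
    rw [show (l.filter fun y => decide (key y ≤ key b ∧ key y < key a)) = l.filter fun y => decide (key y ≤ key b) from List.filter_congr (fun y _ => decide_eq_decide.mpr (by omega))]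
    simp
    intro y _ _; omega


theorem pvFoldl_insL_insG {α : Type} (key : α → Int) (a : α) (t : List α) :
    ∀ (l : List α), l.Pairwise (fun a b => key b ≤ key a) →
    t.foldl (fun acc x => PySem.List.insertBy (fun a b => decide (key b ≤ key a)) x acc)
        (PySem.List.insertBy (fun a b => decide (key b < key a)) a l)
      = PySem.List.insertBy (fun a b => decide (key b < key a)) a
        (t.foldl (fun acc x => PySem.List.insertBy (fun a b => decide (key b ≤ key a)) x acc) l) := by
  induction t with
  | nil => intro l _; rfl
  | cons b t ih =>
    intro l h
    simp only [List.foldl_cons]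
    rw [pvIns_comm key a b l h]
    exact ih _ (pvInsL_pairwise key b l h)

theorem pvRev_insA {α : Type} (key : α → Int) (x : α) (l : List α)
    (h : l.Pairwise (fun a b => key a ≤ key b)) :
    (PySem.List.insertBy (fun a b => decide (key a < key b)) x l).reverse
      = PySem.List.insertBy (fun a b => decide (key b ≤ key a)) x l.reverse := by
  have h' : l.reverse.Pairwise (fun a b => key b ≤ key a) := by
    rw [List.pairwise_reverse]; exact h
  rw [pvInsA_char key x l h, pvInsL_char key x l.reverse h']
  simp [List.filter_reverse]

theorem pvRev_foldA {α : Type} (key : α → Int) (xs : List α) :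
    ∀ (l : List α), l.Pairwise (fun a b => key a ≤ key b) →
    (xs.foldl (fun acc x => PySem.List.insertBy (fun a b => decide (key a < key b)) x acc) l).reverse
      = xs.foldl (fun acc x => PySem.List.insertBy (fun a b => decide (key b ≤ key a)) x acc) l.reverse := by
  induction xs with
  | nil => intro l _; rfl
  | cons a t ih =>
    intro l h
    simp only [List.foldl_cons]
    rw [ih _ (pvInsA_pairwise key a l h), pvRev_insA key a l h]

theorem pvFold_flip {α : Type} (key : α → Int) (xs : List α) :
    xs.foldl (fun acc x => PySem.List.insertBy (fun a b => decide (key b ≤ key a)) x acc) []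
      = xs.reverse.foldl (fun acc x => PySem.List.insertBy (fun a b => decide (key b < key a)) x acc) [] := by
  induction xs with
  | nil => rfl
  | cons a t ih =>
    simp only [List.foldl_cons, List.reverse_cons, List.foldl_append]
    rw [show PySem.List.insertBy (fun a b => decide (key b ≤ key a)) a ([] : List α)
          = PySem.List.insertBy (fun a b => decide (key b < key a)) a [] from rfl]
    rw [pvFoldl_insL_insG key a t [] List.Pairwise.nil, ih]
    rfl

-- Python stability law: reversing an ascending stable sort = descending stable sort of the reversed list
theorem pvSorted_reverse_law {α : Type} (key : α → Int) (xs : List α) :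
    (PySem.List.sorted xs key false).reverse = PySem.List.sorted xs.reverse key true := by
  rw [show PySem.List.sorted xs key false = PySem.List.sorted xs key from rfl]
  rw [PySem.List.sorted_eq_foldl_insertBy, PySem.List.sorted_rev_eq_foldl_insertBy]
  have h1 := pvRev_foldA key xs [] List.Pairwise.nil
  simp only [List.reverse_nil] at h1
  rw [h1]
  exact pvFold_flip key xs

theorem pvInsertBy_map {α β : Type} (f : α → β) (bf : β → β → Bool) (x : α) (l : List α) :
    PySem.List.insertBy bf (f x) (l.map f)
      = (PySem.List.insertBy (fun a b => bf (f a) (f b)) x l).map f := by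
  induction l with
  | nil => rfl
  | cons y t ih =>
    by_cases hb : bf (f x) (f y) <;> simp [PySem.List.insertBy, hb, ih]

theorem pvSorted_map {α β : Type} (f : α → β) (key : β → Int) (rev : Bool) (xs : List α) :
    PySem.List.sorted (xs.map f) key rev = (PySem.List.sorted xs (fun a => key (f a)) rev).map f := by
  cases rev
  · rw [show PySem.List.sorted (xs.map f) key false = PySem.List.sorted (xs.map f) key from rfl,
        show PySem.List.sorted xs (fun a => key (f a)) false = PySem.List.sorted xs (fun a => key (f a)) from rfl]
    rw [PySem.List.sorted_eq_foldl_insertBy, PySem.List.sorted_eq_foldl_insertBy]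
    have gen : ∀ (l acc : List α),
        ((l.map f).foldl (fun acc y => PySem.List.insertBy (fun a b => decide (key a < key b)) y acc) (acc.map f))
          = (l.foldl (fun acc x => PySem.List.insertBy (fun a b => decide (key (f a) < key (f b))) x acc) acc).map f := by
      intro l
      induction l with
      | nil => intro acc; rfl
      | cons x t ih =>
        intro acc
        simp only [List.map_cons, List.foldl_cons]
        rw [pvInsertBy_map f _ x acc]
        exact ih _
    simpa using gen xs []
  · rw [PySem.List.sorted_rev_eq_foldl_insertBy, PySem.List.sorted_rev_eq_foldl_insertBy]
    have gen : ∀ (l acc : List α),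
        ((l.map f).foldl (fun acc y => PySem.List.insertBy (fun a b => decide (key b < key a)) y acc) (acc.map f))
          = (l.foldl (fun acc x => PySem.List.insertBy (fun a b => decide (key (f b) < key (f a))) x acc) acc).map f := by
      intro l
      induction l with
      | nil => intro acc; rfl
      | cons x t ih =>
        intro acc
        simp only [List.map_cons, List.foldl_cons]
        rw [pvInsertBy_map f _ x acc]
        exact ih _
    simpa using gen xs []

-- adding a constant to the key does not change the sort
theorem pvSorted_rev_shift {α : Type} (key : α → Int) (xs : List α) :
    PySem.List.sorted xs (fun g => 1 + key g) true = PySem.List.sorted xs key true := by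
  rw [PySem.List.sorted_rev_eq_foldl_insertBy, PySem.List.sorted_rev_eq_foldl_insertBy]
  have h : ∀ a b : α, decide (1 + key b < 1 + key a) = decide (key b < key a) :=
    fun a b => decide_eq_decide.mpr (by omega)
  simp only [h]

-- ---- dict-loop facts ----

theorem pvGetD_fold_const (c : Int) (l : List Int) : ∀ (d : PySem.Dict Int Int) (k : Int),
    (l.foldl (fun d g => d.insert g c) d).getD k 0 = if k ∈ l then c else d.getD k 0 := by
  induction l with
  | nil => intro d k; simp
  | cons g t ih =>
    intro d k
    simp only [List.foldl_cons]
    rw [ih, PySem.Dict.getD_insert]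
    by_cases h1 : k ∈ t <;> by_cases h2 : k = g <;> simp [h1, h2]

-- A's inner loop over game_list, for a fixed game_id g
theorem pvInnerA_getD (g : Int) (game_list : List (List Int)) (d : PySem.Dict Int Int) (k : Int) :
    (game_list.foldl (fun d tags => if g ∈ tags then d.insert g (d.getD g 0 + 1) else d) d).getD k 0
      = if k = g then d.getD g 0 + (game_list.countP (fun t => decide (g ∈ t)) : Int) else d.getD k 0 := by
  induction game_list generalizing d with
  | nil => by_cases hk : k = g <;> simp [hk]
  | cons tags t ih =>
    simp only [List.foldl_cons, List.countP_cons]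
    by_cases hm : g ∈ tags
    · rw [if_pos hm, ih]
      by_cases hk : k = g
      · subst hk; simp [hm]; ring
      · simp [PySem.Dict.getD_insert, hk]
    · rw [if_neg hm, ih]
      simp [hm]

theorem pvInnerA_keys (g : Int) (game_list : List (List Int)) (d : PySem.Dict Int Int)
    (h : d.contains g = true) :
    (game_list.foldl (fun d tags => if g ∈ tags then d.insert g (d.getD g 0 + 1) else d) d).keys = d.keys := by
  induction game_list generalizing d with
  | nil => rfl
  | cons tags t ih =>
    simp only [List.foldl_cons]
    by_cases hm : g ∈ tags
    · rw [if_pos hm, ih _ (PySem.Dict.contains_insert_self d g _), PySem.Dict.keys_insert_of_contains d _ h]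
    · rw [if_neg hm, ih _ h]

-- A's outer loop
theorem pvOuterA_getD (game_list : List (List Int)) (L : List Int) : ∀ (d : PySem.Dict Int Int) (k : Int),
    (L.foldl (fun d g => game_list.foldl (fun d tags => if g ∈ tags then d.insert g (d.getD g 0 + 1) else d) d) d).getD k 0
      = d.getD k 0 + (L.count k : Int) * (game_list.countP (fun t => decide (k ∈ t)) : Int) := by
  induction L with
  | nil => intro d k; simp
  | cons g t ih =>
    intro d k
    simp only [List.foldl_cons]
    rw [ih, pvInnerA_getD]
    by_cases hk : k = g
    · subst hk; simp; ring
    · simp [hk, Ne.symm hk]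

theorem pvOuterA_keys (game_list : List (List Int)) (L : List Int) : ∀ (d : PySem.Dict Int Int),
    (∀ g ∈ L, d.contains g = true) →
    (L.foldl (fun d g => game_list.foldl (fun d tags => if g ∈ tags then d.insert g (d.getD g 0 + 1) else d) d) d).keys = d.keys := by
  induction L with
  | nil => intro d _; rfl
  | cons g t ih =>
    intro d h
    simp only [List.foldl_cons]
    have hg := h g (by simp)
    have hkeys := pvInnerA_keys g game_list d hg
    rw [ih _ ?_, hkeys]
    intro g' hg'
    rw [PySem.Dict.contains_eq_decide_mem_keys, hkeys, ← PySem.Dict.contains_eq_decide_mem_keys]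
    exact h g' (List.mem_cons_of_mem _ hg')

-- B's counting loop: final value at k
theorem pvContainB_getD (ids : PySem.Set Int) (game_list : List (List Int)) : ∀ (d : PySem.Dict Int Int) (k : Int),
    (game_list.foldl (fun d tags =>
        (PySem.List.dedup tags).foldl (fun d gid =>
          if PySem.Set.contains ids gid then d.insert gid (d.getD gid 0 + 1) else d) d) d).getD k 0
      = d.getD k 0 + (if PySem.Set.contains ids k then (game_list.countP (fun t => decide (k ∈ t)) : Int) else 0) := by
  have inner : ∀ (L : List Int) (d : PySem.Dict Int Int) (k : Int),
      (L.foldl (fun d gid => if PySem.Set.contains ids gid then d.insert gid (d.getD gid 0 + 1) else d) d).getD k 0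
        = d.getD k 0 + (if PySem.Set.contains ids k then (L.count k : Int) else 0) := by
    intro L
    induction L with
    | nil => intro d k; simp
    | cons gid t ih =>
      intro d k
      simp only [List.foldl_cons, List.count_cons]
      rw [ih]
      by_cases hg : PySem.Set.contains ids gid <;> by_cases hck : PySem.Set.contains ids k <;>
        by_cases hk : k = gid <;>
        simp_all [PySem.Dict.getD_insert] <;> omega
  induction game_list with
  | nil => intro d k; simp
  | cons tags t ih =>
    intro d k
    simp only [List.foldl_cons, List.countP_cons]
    rw [ih, inner]
    have hcnt : ((PySem.List.dedup tags).count k : Int) = if k ∈ tags then 1 else 0 := by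
      by_cases hm : k ∈ tags
      · rw [List.count_eq_one_of_mem (by rw [PySem.List.dedup_eq_ofList]; exact PySem.Set.nodup_ofList tags) ((PySem.List.mem_dedup tags k).mpr hm)]
        simp [hm]
      · rw [List.count_eq_zero_of_not_mem (fun hmem => hm ((PySem.List.mem_dedup tags k).mp hmem))]
        simp [hm]
    rw [hcnt]
    by_cases hc : k ∈ ids <;> by_cases hm : k ∈ tags <;> simp [hc, hm]
    ring

-- B's accumulation loop over all_ids: final value at k
theorem pvScoreB_getD (c : Int → Int) (L : List Int) : ∀ (d : PySem.Dict Int Int) (k : Int),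
    (L.foldl (fun d g => d.insert g (d.getD g 0 + c g)) d).getD k 0
      = d.getD k 0 + (L.count k : Int) * c k := by
  induction L with
  | nil => intro d k; simp
  | cons g t ih =>
    intro d k
    simp only [List.foldl_cons, List.count_cons]
    rw [ih, PySem.Dict.getD_insert]
    by_cases hk : k = g
    · subst hk; simp; ring
    · simp [hk, Ne.symm hk]

theorem pvItems_ofList (ps : List (Int × Int)) (h : (ps.map Prod.fst).Nodup) :
    (PySem.Dict.ofList ps).items = ps := by
  have hc : ∀ p ∈ ps, (PySem.Dict.empty : PySem.Dict Int Int).contains p.1 = false :=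
    fun p _ => PySem.Dict.contains_empty p.1
  have := PySem.Dict.items_foldl_insert_fresh ps Prod.fst Prod.snd PySem.Dict.empty hc h
  simpa [PySem.Dict.ofList, PySem.Dict.update] using this

-- ---- putting the two programs in normal form ----

theorem pvA_eq (all_ids : List Int) (game_list : List (List Int)) :
    rank_games_based_on_max_matches all_ids game_list
      = (PySem.List.sorted (PySem.Set.ofList all_ids).reverse
          (fun g => 1 + (all_ids.count g : Int) * (game_list.countP (fun t => decide (g ∈ t)) : Int)) true).take 50 := by
  simp only [rank_games_based_on_max_matches]
  set M := PySem.Set.ofList all_ids with hM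
  set f : Int → Int × Int := fun k => (k, 1 + (all_ids.count k : Int) * (game_list.countP (fun t => decide (k ∈ t)) : Int)) with hf
  set d1 := all_ids.foldl (fun d game_id => d.insert game_id (1 : Int)) PySem.Dict.empty with hd1
  set d2 := all_ids.foldl (fun d game_id =>
      game_list.foldl (fun d tags => if game_id ∈ tags then d.insert game_id (d.getD game_id 0 + 1) else d) d) d1 with hd2
  have hk1 : d1.keys = M := by
    rw [hd1]
    have h := PySem.Dict.keys_foldl_insert (ν := Int) all_ids (fun _ _ => 1) PySem.Dict.empty
    rw [h]; rfl
  have hnd1 : d1.keys.Nodup := by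
    rw [hk1, hM]; exact PySem.Set.nodup_ofList all_ids
  have hcont : ∀ g ∈ all_ids, d1.contains g = true := by
    intro g hg
    rw [PySem.Dict.contains_eq_decide_mem_keys, hk1, hM]
    simp [PySem.Set.mem_ofList, hg]
  have hkeys2 : d2.keys = M := by
    rw [hd2, pvOuterA_keys game_list all_ids d1 hcont, hk1]
  have hnd2 : d2.keys.Nodup := by rw [hkeys2, hM]; exact PySem.Set.nodup_ofList all_ids
  have hitems : d2.items = M.map f := by
    rw [PySem.Dict.items_eq_map_keys d2 hnd2 0, hkeys2]
    apply List.map_congr_left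
    intro k hk
    have hmem : k ∈ all_ids := by rw [hM] at hk; exact (PySem.Set.mem_ofList all_ids k).mp hk
    have h2 := pvOuterA_getD game_list all_ids d1 k
    rw [← hd2] at h2
    have h1 := pvGetD_fold_const 1 all_ids PySem.Dict.empty k
    rw [← hd1] at h1
    rw [hf]
    simp only [h2, h1, if_pos hmem, PySem.Dict.getD_empty]
  have hfst : (M.map f).map Prod.fst = M := by
    rw [hf, List.map_map]
    have h : ((fun (x : Int × Int) => x.1) ∘ fun k : Int => (k, 1 + (all_ids.count k : Int) * (game_list.countP (fun t => decide (k ∈ t)) : Int))) = id := rfl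
    rw [h, List.map_id]
  have hndM : M.Nodup := by rw [hM]; exact PySem.Set.nodup_ofList all_ids
  have hP : ((PySem.List.sorted (M.map f) (fun item => item.2) false).map Prod.fst).Nodup := by
    have hp := (PySem.List.sorted_perm (M.map f) (fun item => item.2) false).map Prod.fst
    rw [hfst] at hp
    exact hp.nodup_iff.mpr hndM
  rw [hitems]
  rw [pvItems_ofList _ hP]
  have hPrev : ((PySem.List.sorted (M.map f) (fun item => item.2) false).reverse.map Prod.fst).Nodup := by
    rw [List.map_reverse]; exact List.nodup_reverse.mpr hP
  rw [pvItems_ofList _ hPrev]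
  have hslice : PySem.List.slice (PySem.List.sorted (M.map f) (fun item => item.2) false).reverse none (some 50)
      = (PySem.List.sorted (M.map f) (fun item => item.2) false).reverse.take 50 := by
    simpa using PySem.List.slice_to_natCast (PySem.List.sorted (M.map f) (fun item => item.2) false).reverse 50
  rw [hslice]
  have hPtake : (((PySem.List.sorted (M.map f) (fun item => item.2) false).reverse.take 50).map Prod.fst).Nodup := by
    rw [List.map_take]
    exact hPrev.sublist (List.take_sublist _ _)
  simp only [PySem.Dict.keys]
  rw [pvItems_ofList _ hPtake]
  rw [pvSorted_reverse_law, ← List.map_reverse, pvSorted_map]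
  rw [List.map_take, List.map_map]
  have hid : ((fun (x : Int × Int) => x.1) ∘ f) = id := by rw [hf]; rfl
  have hkey2 : (fun a => (f a).2) = (fun g => 1 + (all_ids.count g : Int) * (game_list.countP (fun t => decide (g ∈ t)) : Int)) := by rw [hf]
  rw [hid, hkey2, List.map_id]

theorem pvB_eq (all_ids : List Int) (game_list : List (List Int)) :
    rank_games_based_on_max_matches_alt all_ids game_list
      = (PySem.List.sorted (PySem.Set.ofList all_ids).reverse
          (fun g => (all_ids.count g : Int) *
            (if PySem.Set.contains (PySem.Set.ofList all_ids) g then (game_list.countP (fun t => decide (g ∈ t)) : Int) else 0)) true).take 50 := by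
  simp only [rank_games_based_on_max_matches_alt]
  set ids := PySem.Set.ofList all_ids with hids
  set mcounts : PySem.Dict Int Int := game_list.foldl (fun d tags =>
      (PySem.List.dedup tags).foldl (fun d g =>
        if PySem.Set.contains ids g then d.insert g (d.getD g 0 + 1) else d) d)
      PySem.Dict.empty with hmcounts
  set score : PySem.Dict Int Int :=
      all_ids.foldl (fun d g => d.insert g (d.getD g 0 + mcounts.getD g 0)) PySem.Dict.empty with hscore
  have hkeys : score.keys = ids := by
    rw [hscore]
    have h := PySem.Dict.keys_foldl_insert (ν := Int) all_ids (fun d g => d.getD g 0 + mcounts.getD g 0) PySem.Dict.empty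
    rw [h, hids]; rfl
  have hkey : (fun g => score.getD g 0)
      = (fun g => (all_ids.count g : Int) *
          (if PySem.Set.contains ids g then (game_list.countP (fun t => decide (g ∈ t)) : Int) else 0)) := by
    funext g
    have h2 := pvScoreB_getD (fun g => mcounts.getD g 0) all_ids PySem.Dict.empty g
    rw [← hscore] at h2
    have h1 := pvContainB_getD ids game_list PySem.Dict.empty g
    rw [← hmcounts] at h1
    rw [h2, h1]
    simp
  rw [hkeys, hkey, pvSorted_reverse_law]
  simpa using PySem.List.slice_to_natCast
    (PySem.List.sorted ids.reverse
      (fun g => (all_ids.count g : Int) *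
        (if PySem.Set.contains ids g then (game_list.countP (fun t => decide (g ∈ t)) : Int) else 0)) true) 50

-- A's key is exactly 1 + B's key, everywhere (an id off all_ids has count 0 on both sides)
theorem pvKey_shift (all_ids : List Int) (game_list : List (List Int)) :
    (fun g => 1 + (all_ids.count g : Int) * (game_list.countP (fun t => decide (g ∈ t)) : Int))
      = (fun g => 1 + (all_ids.count g : Int) *
          (if PySem.Set.contains (PySem.Set.ofList all_ids) g then (game_list.countP (fun t => decide (g ∈ t)) : Int) else 0)) := by
  funext g
  by_cases hg : g ∈ all_ids
  · have hc : PySem.Set.contains (PySem.Set.ofList all_ids) g = true := by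
      simp [PySem.Set.contains, PySem.Set.mem_ofList, hg]
    rw [if_pos hc]
  · have hc : (all_ids.count g : Int) = 0 := by
      rw [List.count_eq_zero_of_not_mem hg]; rfl
    rw [hc]; simp

-- ===== VERDICT (by name: the statement is the Claim_ definition above) =====
theorem rank_games_based_on_max_matches_spec : Claim_equal_rank_games_based_on_max_matches := by
  intro all_ids game_list _
  unfold Spec_rank_games_based_on_max_matches
  rw [pvA_eq, pvB_eq, pvKey_shift all_ids game_list, pvSorted_rev_shift]
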